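-- pv_equiv track=rewrite | github.com/melekmoalla/holbertonschool-Markdown2HTML | markdown2html.py | convert_ordered_list
-- ===== SOURCE A (Python) =====
-- def convert_ordered_list(lines):
--     """
--     Converts Markdown ordered list to HTML ordered list
--     """
--     in_list = False
--     html_lines = []
--     for line in lines:
--         if line.startswith('* '):
--             if not in_list:
--                 html_lines.append("<ol>")
--                 in_list = True
--             html_lines.append(f"<li>{line[2:].strip()}</li>")
--         else:
--             if in_list:
--                 html_lines.append("</ol>")
--                 in_list = False
--             html_lines.append(line)
--     if in_list:
--         html_lines.append("</ol>")
--     return html_lines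
-- ===== SOURCE B (Python) =====
-- def convert_ordered_list(lines):
--     """
--     Converts Markdown ordered list to HTML ordered list.
--     Run-scanner: an outer index loop; on a list line an inner loop consumes
--     the whole consecutive run and wraps it in <ol>...</ol> (no in_list flag).
--     """
--     html_lines = []
--     i = 0
--     n = len(lines)
--     while i < n:
--         if lines[i].startswith('* '):
--             html_lines.append("<ol>")
--             while i < n and lines[i].startswith('* '):
--                 html_lines.append(f"<li>{lines[i][2:].strip()}</li>")
--                 i += 1
--             html_lines.append("</ol>")
--         else:
--             html_lines.append(lines[i])
--             i += 1
--     return html_lines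
-- ===== Notes on version B (the rewrite author's own statement) =====
-- stated objective: alternative
-- what changed: Replaced the stateful in_list-flag loop by a run-scanner: an outer loop that, on seeing a list line, consumes the whole consecutive run with an inner loop and wraps it in <ol>...</ol>, so no boolean state survives between iterations.
import Mathlib
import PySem

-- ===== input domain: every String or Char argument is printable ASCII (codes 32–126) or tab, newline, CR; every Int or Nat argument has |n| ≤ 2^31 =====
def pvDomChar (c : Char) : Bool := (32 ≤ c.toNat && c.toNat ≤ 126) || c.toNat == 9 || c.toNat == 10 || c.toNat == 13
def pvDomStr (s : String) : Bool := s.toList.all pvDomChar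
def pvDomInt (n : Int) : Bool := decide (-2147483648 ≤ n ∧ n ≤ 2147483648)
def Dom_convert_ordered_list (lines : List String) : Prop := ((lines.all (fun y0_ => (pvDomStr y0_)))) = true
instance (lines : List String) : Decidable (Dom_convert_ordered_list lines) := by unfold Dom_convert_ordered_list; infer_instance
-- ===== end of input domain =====

-- B replaces A's in_list-flag loop by a run-scanner (consume each consecutive '* ' run at once); same cost, no cross-iteration state.

-- ===== PORT A =====
-- line.startswith('* ')
def pvKey (line : String) : Bool := PySem.Str.startswith line "* "
-- f"<li>{line[2:].strip()}</li>"
def pvLi (line : String) : String :=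
  "<li>" ++ PySem.Str.strip (PySem.Str.slice line (some 2) none) ++ "</li>"

-- the body of A's for-loop over state (in_list, html_lines)
def pvAStep (st : Bool × List String) (line : String) : Bool × List String :=
  if pvKey line then
    let st' := if st.1 = false then (true, st.2 ++ ["<ol>"]) else st
    (st'.1, st'.2 ++ [pvLi line])
  else
    let st' := if st.1 then (false, st.2 ++ ["</ol>"]) else st
    (st'.1, st'.2 ++ [line])

def convert_ordered_list (lines : List String) : List String :=
  let st := lines.foldl pvAStep (false, [])
  if st.1 then st.2 ++ ["</ol>"] else st.2

-- ===== PORT B =====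
-- B's outer while loop; the inner while over a run is takeWhile/dropWhile
def pvGo : List String → List String
  | [] => []
  | l :: ls =>
    if pvKey l then
      "<ol>" :: (((l :: ls).takeWhile pvKey).map pvLi
        ++ ("</ol>" :: pvGo ((l :: ls).dropWhile pvKey)))
    else
      l :: pvGo ls
termination_by ls => ls.length
decreasing_by
  · simp only [List.dropWhile_cons, *, if_true]
    exact Nat.lt_succ_of_le (List.length_dropWhile_le pvKey ls)
  · simp

def convert_ordered_list_alt (lines : List String) : List String := pvGo lines

-- ===== PRECONDITION & SPEC =====
def Spec_convert_ordered_list (lines : List String) (out : List String) : Prop := out = convert_ordered_list_alt lines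
instance (lines : List String) (out : List String) : Decidable (Spec_convert_ordered_list lines out) := by unfold Spec_convert_ordered_list; infer_instance

-- ===== CLAIM (what is proved, stated in full; the proofs are below) =====
def Claim_equal_convert_ordered_list : Prop := ∀ (lines : List String), Dom_convert_ordered_list lines → Spec_convert_ordered_list lines (convert_ordered_list lines)

-- ===== LEMMAS AND PROOFS =====

-- Invariant of A's loop: from state (b, html) the finalized output is html ++
-- (in-list: the rest of the current run as <li>s, "</ol>", then B restarts; else B on the rest).
theorem pvLoop_eq (ls : List String) : ∀ (html : List String) (b : Bool),
    (let st := ls.foldl pvAStep (b, html); if st.1 then st.2 ++ ["</ol>"] else st.2)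
      = html ++ (if b then (ls.takeWhile pvKey).map pvLi ++ ("</ol>" :: pvGo (ls.dropWhile pvKey))
                 else pvGo ls) := by
  induction ls with
  | nil => intro html b; cases b <;> simp [pvGo]
  | cons l ls ih =>
    intro html b
    cases hk : pvKey l <;> cases b <;>
      simp only [List.foldl_cons, pvAStep, hk, Bool.false_eq_true, if_true, if_false,
        Bool.true_eq_false, ih, List.takeWhile_cons, List.dropWhile_cons] <;>
      simp [pvGo, hk]

theorem convert_ordered_list_spec : Claim_equal_convert_ordered_list := by
  intro lines _
  unfold Spec_convert_ordered_list convert_ordered_list convert_ordered_list_alt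
  simpa using pvLoop_eq lines [] false
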